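-- pv_equiv track=rewrite | github.com/LoKaki1/Learning-Git | predicting_stocks/GenerateSettings.py | combinations_with_father_list
-- ===== SOURCE A (Python) =====
-- import itertools
--
-- def combinations_with_father_list(father):
--     children = list(
--         itertools.combinations_with_replacement([True, False], len(father))
--     )
--     second = itertools.combinations_with_replacement([False, True], len(father))
--     children.extend(second)
--     children.sort()
--     children = list(children for children, _ in itertools.groupby(children))
--     return children
-- ===== SOURCE B (Python) =====
-- def combinations_with_father_list(father):
--     # emit the answer directly in its sorted order: no duplicate generation, no sort, no dedup
--     n = len(father)
--     if n == 0:
--         return [()]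
--     first = [(False,) * (n - k) + (True,) * k for k in range(n)]
--     second = [(True,) * k + (False,) * (n - k) for k in range(1, n + 1)]
--     return first + second
-- ===== Notes on version B (the rewrite author's own statement) =====
-- stated objective: alternative
-- what changed: B abandons generate-sort-dedup entirely: it emits the result directly in its final sorted order as two closed-form runs (False-prefix tuples by ascending True-count, then True-prefix tuples), with a single n==0 special case, so there is no duplicate generation, no sort and no groupby/set dedup.
import Mathlib
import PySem

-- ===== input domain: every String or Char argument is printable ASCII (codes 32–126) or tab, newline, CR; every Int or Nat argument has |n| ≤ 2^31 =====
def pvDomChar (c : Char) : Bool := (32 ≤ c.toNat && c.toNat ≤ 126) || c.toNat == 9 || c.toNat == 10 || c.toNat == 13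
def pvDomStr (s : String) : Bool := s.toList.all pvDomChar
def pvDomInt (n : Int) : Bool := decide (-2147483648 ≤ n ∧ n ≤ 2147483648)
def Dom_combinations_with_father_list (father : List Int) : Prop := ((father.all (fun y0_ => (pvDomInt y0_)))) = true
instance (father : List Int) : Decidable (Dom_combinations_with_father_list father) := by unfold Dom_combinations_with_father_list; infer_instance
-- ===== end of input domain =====

-- B emits the result directly in its final sorted order as two closed-form runs (no generation of
-- duplicates, no sort, no dedup), replacing A's generate+sort+groupby pipeline (objective: alternative).


-- ===== PORT A =====
-- itertools.combinations_with_replacement(pool, r): nondecreasing index tuples in lex order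
def pvCwr {α : Type} : List α → Nat → List (List α)
  | _, 0 => [[]]
  | [], _+1 => []
  | x :: xs, n+1 => ((pvCwr (x :: xs) n).map (fun t => x :: t)) ++ pvCwr xs (n+1)
termination_by pool n => (pool.length, n)

-- sorted(list of bool tuples): Python's lexicographic tuple order with False < True
def pvSortedLB (xs : List (List Bool)) : List (List Bool) :=
  @PySem.List.sorted (List Bool) (List Bool) List.instLinearOrder.toLT LinearOrder.toDecidableLT xs (fun x => x) false

-- list(k for k, _ in itertools.groupby(l)): first element of each run of consecutive equals
def pvGroupFirst : List (List Bool) → List (List Bool)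
  | [] => []
  | [x] => [x]
  | x :: y :: rest => if x = y then pvGroupFirst (y :: rest) else x :: pvGroupFirst (y :: rest)

def combinations_with_father_list (father : List Int) : List (List Bool) :=
  let children := pvCwr [true, false] father.length
  let second := pvCwr [false, true] father.length
  let children2 := children ++ second
  let children3 := pvSortedLB children2
  pvGroupFirst children3

-- ===== PORT B =====
def combinations_with_father_list_alt (father : List Int) : List (List Bool) :=
  if father.length = 0 then [[]]
  else
    ((List.range father.length).map
      (fun k => List.replicate (father.length - k) false ++ List.replicate k true)) ++
    ((List.range father.length).map
      (fun k => List.replicate (k + 1) true ++ List.replicate (father.length - (k + 1)) false))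

-- ===== PRECONDITION & SPEC =====
def Spec_combinations_with_father_list (father : List Int) (out : List (List Bool)) : Prop := out = combinations_with_father_list_alt father
instance (father : List Int) (out : List (List Bool)) : Decidable (Spec_combinations_with_father_list father out) := by unfold Spec_combinations_with_father_list; infer_instance

-- ===== CLAIM (what is proved, stated in full; the proofs are below) =====
def Claim_equal_combinations_with_father_list : Prop := ∀ (father : List Int), Dom_combinations_with_father_list father → Spec_combinations_with_father_list father (combinations_with_father_list father)

-- ===== LEMMAS AND PROOFS =====

lemma pvCwr_zero {α : Type} (pool : List α) : pvCwr pool 0 = [[]] := by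
  cases pool <;> simp [pvCwr]

lemma pvCwr_single {α : Type} (b : α) (n : Nat) : pvCwr [b] n = [List.replicate n b] := by
  induction n with
  | zero => simp [pvCwr]
  | succ n ih => simp [pvCwr, ih, List.replicate_succ]

lemma pvCwr_pair {α : Type} (a b : α) (n : Nat) :
    pvCwr [a, b] n = (List.range (n + 1)).map (fun k => List.replicate (n - k) a ++ List.replicate k b) := by
  induction n with
  | zero => simp [pvCwr]
  | succ n ih =>
    have step : pvCwr [a, b] (n+1) = ((pvCwr [a, b] n).map (fun t => a :: t)) ++ pvCwr [b] (n+1) := by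
      simp [pvCwr]
    rw [step, ih, pvCwr_single,
        show List.range (n+1+1) = List.range (n+1) ++ [n+1] from List.range_succ,
        List.map_append, List.map_map]
    congr 1
    · apply List.map_congr_left
      intro k hk
      simp only [List.mem_range] at hk
      have hnk : n + 1 - k = (n - k) + 1 := by omega
      simp [Function.comp, hnk, List.replicate_succ]
    · simp

lemma mem_pvGroupFirst (l : List (List Bool)) (a : List Bool) : a ∈ pvGroupFirst l ↔ a ∈ l := by
  induction l using pvGroupFirst.induct with
  | case1 => simp [pvGroupFirst]
  | case2 x => simp [pvGroupFirst]
  | case3 y rest ih => simp [pvGroupFirst, ih]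
  | case4 x y rest h ih => simp [pvGroupFirst, h, ih]

lemma pairwise_pvGroupFirst (l : List (List Bool)) (h : l.Pairwise (· ≤ ·)) :
    (pvGroupFirst l).Pairwise (· < ·) := by
  induction l using pvGroupFirst.induct with
  | case1 => simp [pvGroupFirst]
  | case2 x => simp [pvGroupFirst]
  | case3 y rest ih =>
    simp only [pvGroupFirst]
    exact ih h.of_cons
  | case4 x y rest hne ih =>
    simp only [pvGroupFirst, if_neg hne]
    rcases List.pairwise_cons.1 h with ⟨hx, htail⟩
    refine List.pairwise_cons.2 ⟨?_, ih htail⟩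
    intro z hz
    rw [mem_pvGroupFirst] at hz
    have hxy : x < y := lt_of_le_of_ne (hx y (by simp)) hne
    rcases List.mem_cons.1 hz with rfl | hz'
    · exact hxy
    · exact lt_of_lt_of_le hxy (List.rel_of_pairwise_cons htail hz')

lemma mem_pvSortedLB (xs : List (List Bool)) (a : List Bool) : a ∈ pvSortedLB xs ↔ a ∈ xs :=
  @PySem.List.mem_sorted (List Bool) (List Bool) List.instLinearOrder.toLT LinearOrder.toDecidableLT xs (fun x => x) false a

lemma pvGroupFirst_sorted_eq (xs : List (List Bool)) :
    pvGroupFirst (pvSortedLB xs) = pvSortedLB (PySem.Set.ofList xs) := by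
  have h1 : (pvGroupFirst (pvSortedLB xs)).Pairwise (· < ·) :=
    pairwise_pvGroupFirst _ (PySem.List.sorted_pairwise xs (fun x => x))
  have h2 : (pvSortedLB (PySem.Set.ofList xs)).Pairwise (· < ·) :=
    PySem.List.sorted_ofList_pairwise_lt xs
  have hperm : (pvGroupFirst (pvSortedLB xs)).Perm (pvSortedLB (PySem.Set.ofList xs)) := by
    refine (List.perm_ext_iff_of_nodup (h1.imp ne_of_lt) (h2.imp ne_of_lt)).2 ?_
    intro a
    rw [mem_pvGroupFirst]
    rw [mem_pvSortedLB, mem_pvSortedLB, PySem.Set.mem_ofList]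
  exact List.Perm.eq_of_pairwise
    (fun a b _ _ hab hba => absurd hba (lt_asymm hab)) h1 h2 hperm

lemma mem_pvCwr_both (n : Nat) (x : List Bool) :
    x ∈ pvCwr [true, false] n ++ pvCwr [false, true] n ↔
      ∃ i, i ≤ n ∧ (x = List.replicate i true ++ List.replicate (n - i) false ∨
                    x = List.replicate i false ++ List.replicate (n - i) true) := by
  simp only [List.mem_append, pvCwr_pair, List.mem_map, List.mem_range]
  constructor
  · rintro (⟨k, hk, rfl⟩ | ⟨k, hk, rfl⟩)
    · exact ⟨n - k, by omega, Or.inl (by rw [show n - (n - k) = k by omega])⟩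
    · exact ⟨n - k, by omega, Or.inr (by rw [show n - (n - k) = k by omega])⟩
  · rintro ⟨i, hi, rfl | rfl⟩
    · exact Or.inl ⟨n - i, by omega, by rw [show n - (n - i) = i by omega]⟩
    · exact Or.inr ⟨n - i, by omega, by rw [show n - (n - i) = i by omega]⟩

-- lexicographic order on List Bool: a shared prefix, then false beats true
lemma lex_mid (p u v : List Bool) : p ++ false :: u < p ++ true :: v := by
  induction p with
  | nil => exact List.Lex.rel (by decide)
  | cons a t ih => exact List.Lex.cons ih

lemma rep_FT_lt (n k k' : Nat) (h : k < k') (h2 : k' ≤ n) :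
    List.replicate (n - k) false ++ List.replicate k true
      < List.replicate (n - k') false ++ List.replicate k' true := by
  have e1 : List.replicate (n - k) false
      = List.replicate (n - k') false ++ false :: List.replicate (k' - k - 1) false := by
    rw [show n - k = (n - k') + (k' - k - 1 + 1) by omega, List.replicate_add]
    simp [List.replicate_succ]
  have e2 : List.replicate k' true = true :: List.replicate (k' - 1) true := by
    rw [show k' = (k' - 1) + 1 by omega, List.replicate_succ]
    simp
  rw [e1, e2, List.append_assoc]
  simpa using lex_mid (List.replicate (n - k') false)
    (List.replicate (k' - k - 1) false ++ List.replicate k true) (List.replicate (k' - 1) true)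

lemma rep_TF_lt (n i i' : Nat) (h : i < i') (h2 : i' ≤ n) :
    List.replicate i true ++ List.replicate (n - i) false
      < List.replicate i' true ++ List.replicate (n - i') false := by
  have e1 : List.replicate i' true
      = List.replicate i true ++ true :: List.replicate (i' - i - 1) true := by
    rw [show i' = i + (i' - i - 1 + 1) by omega, List.replicate_add]
    simp [List.replicate_succ]
  have e2 : List.replicate (n - i) false = false :: List.replicate (n - i - 1) false := by
    rw [show n - i = (n - i - 1) + 1 by omega, List.replicate_succ]
    simp
  rw [e1, e2, List.append_assoc]
  exact lex_mid (List.replicate i true) (List.replicate (n - i - 1) false)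
    (List.replicate (i' - i - 1) true ++ List.replicate (n - i') false)

lemma rep_F_lt_T (n k i : Nat) (hk : k < n) :
    List.replicate (n - k) false ++ List.replicate k true
      < List.replicate (i + 1) true ++ List.replicate (n - (i + 1)) false := by
  have e1 : List.replicate (n - k) false = false :: List.replicate (n - k - 1) false := by
    rw [show n - k = (n - k - 1) + 1 by omega, List.replicate_succ]
    simp
  rw [e1, List.replicate_succ]
  exact lex_mid [] _ _

lemma mem_alt_iff (n : Nat) (hn : n ≠ 0) (x : List Bool) :
    (x ∈ ((List.range n).map
        (fun k => List.replicate (n - k) false ++ List.replicate k true)) ++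
      ((List.range n).map
        (fun k => List.replicate (k + 1) true ++ List.replicate (n - (k + 1)) false))) ↔
      ∃ i, i ≤ n ∧ (x = List.replicate i true ++ List.replicate (n - i) false ∨
                    x = List.replicate i false ++ List.replicate (n - i) true) := by
  simp only [List.mem_append, List.mem_map, List.mem_range]
  constructor
  · rintro (⟨k, hk, rfl⟩ | ⟨k, hk, rfl⟩)
    · exact ⟨n - k, by omega, Or.inr (by rw [show n - (n - k) = k by omega])⟩
    · exact ⟨k + 1, by omega, Or.inl rfl⟩
  · rintro ⟨i, hi, rfl | rfl⟩
    · rcases Nat.eq_zero_or_pos i with rfl | hip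
      · exact Or.inl ⟨0, by omega, by simp⟩
      · exact Or.inr ⟨i - 1, by omega, by rw [show i - 1 + 1 = i by omega]⟩
    · rcases Nat.eq_zero_or_pos i with rfl | hip
      · refine Or.inr ⟨n - 1, by omega, ?_⟩
        rw [show n - 1 + 1 = n by omega]
        simp
      · exact Or.inl ⟨n - i, by omega, by rw [show n - (n - i) = i by omega]⟩

lemma pairwise_alt (n : Nat) :
    (((List.range n).map
        (fun k => List.replicate (n - k) false ++ List.replicate k true)) ++
      ((List.range n).map
        (fun k => List.replicate (k + 1) true ++ List.replicate (n - (k + 1)) false))).Pairwise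
      (· < ·) := by
  rw [List.pairwise_append]
  refine ⟨?_, ?_, ?_⟩
  · rw [List.pairwise_map]
    refine List.pairwise_lt_range.imp_of_mem ?_
    intro a b ha hb hab
    exact rep_FT_lt n a b hab (Nat.le_of_lt (List.mem_range.1 hb))
  · rw [List.pairwise_map]
    refine List.pairwise_lt_range.imp_of_mem ?_
    intro a b ha hb hab
    exact rep_TF_lt n (a + 1) (b + 1) (by omega) (List.mem_range.1 hb)
  · intro x hx y hy
    simp only [List.mem_map, List.mem_range] at hx hy
    obtain ⟨k, hk, rfl⟩ := hx
    obtain ⟨i, hi, rfl⟩ := hy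
    exact rep_F_lt_T n k i hk

-- ===== VERDICT (by name: the statement is the Claim_ definition above) =====
theorem combinations_with_father_list_spec : Claim_equal_combinations_with_father_list := by
  intro father _
  unfold Spec_combinations_with_father_list combinations_with_father_list combinations_with_father_list_alt
  by_cases hn : father.length = 0
  · rw [if_pos hn, hn]
    show pvGroupFirst (pvSortedLB (pvCwr [true, false] 0 ++ pvCwr [false, true] 0)) = [[]]
    rw [pvCwr_zero, pvCwr_zero]
    decide
  · rw [if_neg hn, pvGroupFirst_sorted_eq]
    unfold pvSortedLB
    have hperm : (((List.range father.length).map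
          (fun k => List.replicate (father.length - k) false ++ List.replicate k true)) ++
        ((List.range father.length).map
          (fun k => List.replicate (k + 1) true ++ List.replicate (father.length - (k + 1)) false))).Perm
        (PySem.Set.ofList (pvCwr [true, false] father.length ++ pvCwr [false, true] father.length)) := by
      refine (List.perm_ext_iff_of_nodup ((pairwise_alt father.length).imp ne_of_lt)
        (PySem.Set.nodup_ofList _)).2 ?_
      intro a
      rw [PySem.Set.mem_ofList, mem_pvCwr_both, mem_alt_iff father.length hn]
    exact PySem.List.sorted_eq_of_perm_of_pairwise_lt _ _ _ hperm (pairwise_alt father.length)
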